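-- pv_equiv track=rewrite | github.com/docxology/p3if | p3if_examples/healthcare_domain_orchestrator.py | _identify_overlapping_requirements
-- ===== SOURCE A (Python) =====
-- from typing import Dict, List, Any, Optional
--
-- def _identify_overlapping_requirements(frameworks: Dict[str, Any]) -> List[str]:
--     """Identify overlapping requirements across frameworks."""
--     # Simple analysis of common themes
--     overlaps = []
--
--     all_requirements = []
--     for framework_name, framework in frameworks.items():
--         for req in framework["requirements"]:
--             all_requirements.append(req.lower())
--
--     # Find common themes
--     common_themes = [
--         "privacy", "security", "consent", "notification", "breach"
--     ]
--
--     for theme in common_themes: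
--         if any(theme in req for req in all_requirements):
--             overlaps.append(f"Common {theme} requirement across frameworks")
--
--     return overlaps
-- ===== SOURCE B (Python) =====
-- def _identify_overlapping_requirements(frameworks):
--     """Identify overlapping requirements across frameworks (one pass, set of found themes)."""
--     common_themes = ["privacy", "security", "consent", "notification", "breach"]
--     found = set()
--     for framework in frameworks.values():
--         for req in framework["requirements"]:
--             low = req.lower()
--             for theme in common_themes:
--                 if theme in low:
--                     found.add(theme)
--     return [f"Common {theme} requirement across frameworks"
--             for theme in common_themes if theme in found]
-- ===== Notes on version B (the rewrite author's own statement) =====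
-- stated objective: alternative
-- what changed: Inverts the loop nesting: one pass over all requirements collects contained themes into a set, then messages are emitted in the fixed theme order, instead of theme-outer scans over a rebuilt list of all lowered requirements.
-- outside the precondition, e.g. on _identify_overlapping_requirements({'f': {}}): A raises KeyError, B raises KeyError
import Mathlib
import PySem

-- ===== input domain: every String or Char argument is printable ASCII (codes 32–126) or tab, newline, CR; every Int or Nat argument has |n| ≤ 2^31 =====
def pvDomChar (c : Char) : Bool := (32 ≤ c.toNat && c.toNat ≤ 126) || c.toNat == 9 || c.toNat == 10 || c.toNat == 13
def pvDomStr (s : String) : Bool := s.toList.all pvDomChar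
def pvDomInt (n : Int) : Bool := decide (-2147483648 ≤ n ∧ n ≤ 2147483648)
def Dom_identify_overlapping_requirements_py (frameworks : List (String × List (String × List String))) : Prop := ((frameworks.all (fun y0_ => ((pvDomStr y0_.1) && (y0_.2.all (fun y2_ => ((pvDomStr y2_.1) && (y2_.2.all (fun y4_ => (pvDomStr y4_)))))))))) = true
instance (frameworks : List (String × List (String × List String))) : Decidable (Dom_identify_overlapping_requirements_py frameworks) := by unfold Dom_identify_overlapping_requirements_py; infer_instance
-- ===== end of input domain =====

-- B inverts the loop nesting (one pass over requirements collecting found themes in a set,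
-- then emitting messages in theme order) instead of rescanning all requirements per theme; same output.

-- framework["requirements"] (first-match dict lookup; Pre_ excludes the KeyError case)
def pyGetReqs (fw : List (String × List String)) : List String :=
  ((PySem.Dict.mk fw).get? "requirements").getD []

-- ===== PORT A =====
def identify_overlapping_requirements_py (frameworks : List (String × List (String × List String))) : List String :=
  let all_requirements : List String :=
    frameworks.foldl (fun acc f =>
      (pyGetReqs f.2).foldl (fun acc req => acc ++ [PySem.Str.lower req]) acc) []
  let common_themes : List String := ["privacy", "security", "consent", "notification", "breach"]
  common_themes.foldl (fun overlaps theme =>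
    if all_requirements.any (fun req => PySem.Str.isIn theme req) then
      overlaps ++ ["Common " ++ theme ++ " requirement across frameworks"]
    else overlaps) []

-- ===== PORT B =====
def identify_overlapping_requirements_py_alt (frameworks : List (String × List (String × List String))) : List String :=
  let common_themes : List String := ["privacy", "security", "consent", "notification", "breach"]
  let found : PySem.Set String :=
    frameworks.foldl (fun s f =>
      (pyGetReqs f.2).foldl (fun s req =>
        let low := PySem.Str.lower req
        common_themes.foldl (fun s theme =>
          if PySem.Str.isIn theme low then PySem.Set.add s theme else s) s) s) PySem.Set.empty
  (common_themes.filter (fun theme => PySem.Set.contains found theme)).map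
    (fun theme => "Common " ++ theme ++ " requirement across frameworks")

-- ===== PRECONDITION & SPEC =====
-- Pre_ excludes exactly the frameworks whose dict lacks the key "requirements", where Python A raises KeyError.
def Pre_identify_overlapping_requirements_py (frameworks : List (String × List (String × List String))) : Prop :=
  (frameworks.all (fun f => (PySem.Dict.mk f.2).contains "requirements")) = true
instance (frameworks : List (String × List (String × List String))) : Decidable (Pre_identify_overlapping_requirements_py frameworks) := by unfold Pre_identify_overlapping_requirements_py; infer_instance
def pvWitness_identify_overlapping_requirements_py : (List (String × List (String × List String))) :=
  [("HIPAA", [("requirements", ["Privacy Rule", "Breach notification"])])]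

def Spec_identify_overlapping_requirements_py (frameworks : List (String × List (String × List String))) (out : List String) : Prop := out = identify_overlapping_requirements_py_alt frameworks
instance (frameworks : List (String × List (String × List String))) (out : List String) : Decidable (Spec_identify_overlapping_requirements_py frameworks out) := by unfold Spec_identify_overlapping_requirements_py; infer_instance

-- ===== CLAIM (what is proved, stated in full; the proofs are below) =====
def Claim_equal_identify_overlapping_requirements_py : Prop := ∀ (frameworks : List (String × List (String × List String))), Dom_identify_overlapping_requirements_py frameworks → Pre_identify_overlapping_requirements_py frameworks → Spec_identify_overlapping_requirements_py frameworks (identify_overlapping_requirements_py frameworks)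

-- ===== LEMMAS AND PROOFS =====

-- the accumulator-threaded "append if" loop of A's second phase is filter-then-map
lemma foldl_if_append_eq_map_filter {α β : Type} (p : α → Bool) (f : α → β) :
    ∀ (l : List α) (acc : List β),
      l.foldl (fun a x => if p x then a ++ [f x] else a) acc = acc ++ (l.filter p).map f := by
  intro l
  induction l with
  | nil => simp
  | cons x xs ih =>
    intro acc
    by_cases h : p x = true <;> simp [List.foldl, h, ih]

-- membership in B's innermost (themes) loop
lemma mem_themes_fold (low : String) :
    ∀ (themes : List String) (s : PySem.Set String) (y : String),
      y ∈ themes.foldl (fun s t => if PySem.Str.isIn t low then PySem.Set.add s t else s) s ↔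
        y ∈ s ∨ (y ∈ themes ∧ PySem.Str.isIn y low = true) := by
  intro themes
  induction themes with
  | nil => simp
  | cons t ts ih =>
    intro s y
    by_cases h : PySem.Str.isIn t low = true
    · simp only [List.foldl, h, if_pos]
      rw [ih]
      simp only [PySem.Set.mem_add, List.mem_cons]
      constructor
      · rintro ((hy | rfl) | hy)
        · exact Or.inl hy
        · exact Or.inr ⟨Or.inl rfl, h⟩
        · exact Or.inr ⟨Or.inr hy.1, hy.2⟩
      · rintro (hy | ⟨(rfl | hy), hlow⟩)
        · exact Or.inl (Or.inl hy)
        · exact Or.inl (Or.inr rfl)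
        · exact Or.inr ⟨hy, hlow⟩
    · simp only [List.foldl, h, if_neg, Bool.false_eq_true, not_false_iff]
      rw [ih]
      simp only [List.mem_cons]
      constructor
      · rintro (hy | hy)
        · exact Or.inl hy
        · exact Or.inr ⟨Or.inr hy.1, hy.2⟩
      · rintro (hy | ⟨(rfl | hy), hlow⟩)
        · exact Or.inl hy
        · exact absurd hlow h
        · exact Or.inr ⟨hy, hlow⟩

-- membership in B's per-framework (requirements) loop
lemma mem_reqs_fold (themes : List String) :
    ∀ (reqs : List String) (s : PySem.Set String) (y : String),
      y ∈ reqs.foldl (fun s req =>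
            themes.foldl (fun s t => if PySem.Str.isIn t (PySem.Str.lower req) then PySem.Set.add s t else s) s) s ↔
        y ∈ s ∨ (y ∈ themes ∧ ∃ r ∈ reqs, PySem.Str.isIn y (PySem.Str.lower r) = true) := by
  intro reqs
  induction reqs with
  | nil => simp
  | cons r rs ih =>
    intro s y
    simp only [List.foldl]
    rw [ih, mem_themes_fold]
    constructor
    · rintro ((hy | ⟨ht, hlow⟩) | ⟨ht, q, hq, hlow⟩)
      · exact Or.inl hy
      · exact Or.inr ⟨ht, r, List.mem_cons_self .., hlow⟩
      · exact Or.inr ⟨ht, q, List.mem_cons_of_mem _ hq, hlow⟩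
    · rintro (hy | ⟨ht, q, hq, hlow⟩)
      · exact Or.inl (Or.inl hy)
      · rcases List.mem_cons.mp hq with rfl | hq
        · exact Or.inl (Or.inr ⟨ht, hlow⟩)
        · exact Or.inr ⟨ht, q, hq, hlow⟩

-- membership in B's found set
lemma mem_found (themes : List String) :
    ∀ (frameworks : List (String × List (String × List String))) (s : PySem.Set String) (y : String),
      y ∈ frameworks.foldl (fun s f =>
            (pyGetReqs f.2).foldl (fun s req =>
              themes.foldl (fun s t => if PySem.Str.isIn t (PySem.Str.lower req) then PySem.Set.add s t else s) s) s) s ↔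
        y ∈ s ∨ (y ∈ themes ∧ ∃ f ∈ frameworks, ∃ r ∈ pyGetReqs f.2, PySem.Str.isIn y (PySem.Str.lower r) = true) := by
  intro frameworks
  induction frameworks with
  | nil => simp
  | cons f fs ih =>
    intro s y
    simp only [List.foldl]
    rw [ih, mem_reqs_fold]
    constructor
    · rintro ((hy | ⟨ht, hex⟩) | ⟨ht, g, hg, hex⟩)
      · exact Or.inl hy
      · exact Or.inr ⟨ht, f, List.mem_cons_self .., hex⟩
      · exact Or.inr ⟨ht, g, List.mem_cons_of_mem _ hg, hex⟩
    · rintro (hy | ⟨ht, g, hg, hex⟩)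
      · exact Or.inl (Or.inl hy)
      · rcases List.mem_cons.mp hg with rfl | hg
        · exact Or.inl (Or.inr ⟨ht, hex⟩)
        · exact Or.inr ⟨ht, g, hg, hex⟩

-- A's all_requirements list is the flat map of the lowered requirements
lemma allreqs_eq (frameworks : List (String × List (String × List String))) :
    ∀ (acc : List String),
      frameworks.foldl (fun acc f =>
        (pyGetReqs f.2).foldl (fun acc req => acc ++ [PySem.Str.lower req]) acc) acc =
      acc ++ frameworks.flatMap (fun f => (pyGetReqs f.2).map PySem.Str.lower) := by
  induction frameworks with
  | nil => simp
  | cons f fs ih =>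
    intro acc
    simp only [List.foldl, List.flatMap_cons]
    rw [PySem.List.foldl_append_singleton_eq_map, ih, List.append_assoc]

-- ===== VERDICT (by name: the statement is the Claim_ definition above) =====
theorem identify_overlapping_requirements_py_spec : Claim_equal_identify_overlapping_requirements_py := by
  intro frameworks _ _
  show identify_overlapping_requirements_py frameworks = identify_overlapping_requirements_py_alt frameworks
  unfold identify_overlapping_requirements_py identify_overlapping_requirements_py_alt
  simp only []
  rw [foldl_if_append_eq_map_filter, List.nil_append]
  congr 1
  apply List.filter_congr
  intro t ht
  rw [Bool.eq_iff_iff, List.any_eq_true, PySem.Set.contains_iff, mem_found]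
  rw [allreqs_eq, List.nil_append]
  simp only [List.mem_flatMap, List.mem_map]
  constructor
  · rintro ⟨r, ⟨f, hf, q, hq, rfl⟩, hin⟩
    exact Or.inr ⟨ht, f, hf, q, hq, hin⟩
  · rintro (hy | ⟨_, f, hf, q, hq, hin⟩)
    · simp at hy
    · exact ⟨PySem.Str.lower q, ⟨f, hf, q, hq, rfl⟩, hin⟩
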